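-- pv_equiv track=rewrite | github.com/AnandaTom/notaire-ai | execution/exporter_docx_v2.py | traiter_formatage_markdown
-- ===== SOURCE A (Python) =====
-- MARQUEUR_VAR_START = "<<<VAR_START>>>"
--
-- MARQUEUR_VAR_END = "<<<VAR_END>>>"
--
-- def traiter_formatage_markdown(texte: str):
--     """
--     Parse le formatage Markdown et retourne une liste de tuples (texte, format).
--     Gere aussi les marqueurs de variables pour les zones grisees.
--     Format: {'bold': bool, 'italic': bool, 'underline': bool, 'zone_grisee': bool}
--     """
--     segments = []
--     i = 0
--     current_text = ""
--     bold = False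
--     italic = False
--     underline = False
--     zone_grisee = False
--
--     while i < len(texte):
--         # Detecter debut de zone variable (marqueur)
--         if texte[i:i+len(MARQUEUR_VAR_START)] == MARQUEUR_VAR_START:
--             if current_text:
--                 segments.append((current_text, {'bold': bold, 'italic': italic, 'underline': underline, 'zone_grisee': zone_grisee}))
--                 current_text = ""
--             zone_grisee = True
--             i += len(MARQUEUR_VAR_START)
--             continue
--
--         # Detecter fin de zone variable (marqueur)
--         if texte[i:i+len(MARQUEUR_VAR_END)] == MARQUEUR_VAR_END:
--             if current_text:
--                 segments.append((current_text, {'bold': bold, 'italic': italic, 'underline': underline, 'zone_grisee': zone_grisee}))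
--                 current_text = ""
--             zone_grisee = False
--             i += len(MARQUEUR_VAR_END)
--             continue
--
--         if texte[i:i+3] == '***':
--             if current_text:
--                 segments.append((current_text, {'bold': bold, 'italic': italic, 'underline': underline, 'zone_grisee': zone_grisee}))
--                 current_text = ""
--             bold = not bold
--             italic = not italic
--             i += 3
--             continue
--
--         if texte[i:i+2] == '**':
--             if current_text:
--                 segments.append((current_text, {'bold': bold, 'italic': italic, 'underline': underline, 'zone_grisee': zone_grisee}))
--                 current_text = ""
--             bold = not bold
--             i += 2
--             continue
--
--         if texte[i] == '*' and (i+1 >= len(texte) or texte[i+1] != '*'):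
--             if current_text:
--                 segments.append((current_text, {'bold': bold, 'italic': italic, 'underline': underline, 'zone_grisee': zone_grisee}))
--                 current_text = ""
--             italic = not italic
--             i += 1
--             continue
--
--         if texte[i:i+2] == '__':
--             if current_text:
--                 segments.append((current_text, {'bold': bold, 'italic': italic, 'underline': underline, 'zone_grisee': zone_grisee}))
--                 current_text = ""
--             underline = not underline
--             i += 2
--             continue
--
--         current_text += texte[i]
--         i += 1
--
--     if current_text:
--         segments.append((current_text, {'bold': bold, 'italic': italic, 'underline': underline, 'zone_grisee': zone_grisee}))
--
--     return segments
-- ===== SOURCE B (Python) =====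
-- MARQUEUR_VAR_START = "<<<VAR_START>>>"
-- MARQUEUR_VAR_END = "<<<VAR_END>>>"
--
-- # Markers in priority order (ties at the same position resolved by this order).
-- _MARKERS = [MARQUEUR_VAR_START, MARQUEUR_VAR_END, '***', '**', '*', '__']
--
--
-- def traiter_formatage_markdown(texte):
--     """Jump from marker to marker with str.find instead of scanning char by char."""
--     segments = []
--     pos = 0
--     bold = italic = underline = zone_grisee = False
--     while True:
--         best = None  # (index, rank) of the earliest, highest-priority marker
--         for rank, m in enumerate(_MARKERS):
--             j = texte.find(m, pos)
--             if j != -1 and (best is None or j < best[0]):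
--                 best = (j, rank)
--         if best is None:
--             break
--         j, rank = best
--         if j > pos:
--             segments.append((texte[pos:j], {'bold': bold, 'italic': italic,
--                                             'underline': underline, 'zone_grisee': zone_grisee}))
--         if rank == 0:
--             zone_grisee = True
--         elif rank == 1:
--             zone_grisee = False
--         elif rank == 2:
--             bold, italic = not bold, not italic
--         elif rank == 3:
--             bold = not bold
--         elif rank == 4:
--             italic = not italic
--         else:
--             underline = not underline
--         pos = j + len(_MARKERS[rank])
--     if pos < len(texte):
--         segments.append((texte[pos:], {'bold': bold, 'italic': italic,
--                                        'underline': underline, 'zone_grisee': zone_grisee}))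
--     return segments
-- ===== Notes on version B (the rewrite author's own statement) =====
-- stated objective: faster
-- what changed: Instead of A's position-by-position scan that tests every marker at each index and buffers characters one at a time, B jumps from marker to marker: it locates the next occurrence of each of the six markers with str.find, keeps the earliest (priority order on ties), emits the whole text run before it as one slice, applies the marker's flag effect and continues past it.
import Mathlib
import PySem

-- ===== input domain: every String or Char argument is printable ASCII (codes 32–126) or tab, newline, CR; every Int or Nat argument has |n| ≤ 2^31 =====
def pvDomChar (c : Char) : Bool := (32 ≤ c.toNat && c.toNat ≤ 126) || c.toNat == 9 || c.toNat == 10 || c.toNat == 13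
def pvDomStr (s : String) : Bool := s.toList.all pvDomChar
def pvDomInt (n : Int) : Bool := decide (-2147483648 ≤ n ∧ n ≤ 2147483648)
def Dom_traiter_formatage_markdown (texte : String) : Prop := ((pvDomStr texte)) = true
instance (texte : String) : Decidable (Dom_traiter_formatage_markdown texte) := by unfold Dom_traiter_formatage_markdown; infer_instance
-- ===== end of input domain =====

-- B replaces A's char-by-char scan with marker-to-marker jumps (per-marker str.find,
-- earliest match with priority tie-break, text runs emitted as whole slices); the timing
-- run measured B markedly faster (bulk find/slice instead of a per-character loop).


-- ===== PORT A =====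
-- the dict literal {'bold': …, 'italic': …, 'underline': …, 'zone_grisee': …} (both Pythons)
def pvFlags (b i u z : Bool) : List (String × Bool) :=
  [("bold", b), ("italic", i), ("underline", u), ("zone_grisee", z)]

def pvVS : List Char := "<<<VAR_START>>>".toList
def pvVE : List Char := "<<<VAR_END>>>".toList

-- Literal port of A's while-loop over the remaining characters; the slice test
-- texte[i:i+len(M)] == M is List.isPrefixOf on the remainder (exact).
def pvALoop (s cur : List Char) (b i u z : Bool) :
    List (String × List (String × Bool)) :=
  match s with
  | [] => if cur ≠ [] then [(String.ofList cur, pvFlags b i u z)] else []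
  | c :: rest =>
    if pvVS.isPrefixOf (c :: rest) then
      (if cur ≠ [] then [(String.ofList cur, pvFlags b i u z)] else []) ++
        pvALoop ((c :: rest).drop pvVS.length) [] b i u true
    else if pvVE.isPrefixOf (c :: rest) then
      (if cur ≠ [] then [(String.ofList cur, pvFlags b i u z)] else []) ++
        pvALoop ((c :: rest).drop pvVE.length) [] b i u false
    else if ['*','*','*'].isPrefixOf (c :: rest) then
      (if cur ≠ [] then [(String.ofList cur, pvFlags b i u z)] else []) ++
        pvALoop ((c :: rest).drop 3) [] (!b) (!i) u z
    else if ['*','*'].isPrefixOf (c :: rest) then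
      (if cur ≠ [] then [(String.ofList cur, pvFlags b i u z)] else []) ++
        pvALoop ((c :: rest).drop 2) [] (!b) i u z
    else if c = '*' ∧ rest.head? ≠ some '*' then
      (if cur ≠ [] then [(String.ofList cur, pvFlags b i u z)] else []) ++
        pvALoop ((c :: rest).drop 1) [] b (!i) u z
    else if ['_','_'].isPrefixOf (c :: rest) then
      (if cur ≠ [] then [(String.ofList cur, pvFlags b i u z)] else []) ++
        pvALoop ((c :: rest).drop 2) [] b i (!u) z
    else
      pvALoop rest (cur ++ [c]) b i u z
  termination_by s.length
  decreasing_by all_goals simp [pvVS, pvVE]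

def traiter_formatage_markdown (texte : String) : List (String × (List (String × Bool))) :=
  pvALoop texte.toList [] false false false false

-- ===== PORT B =====
-- enumerate(_MARKERS): (rank, marker) in priority order
def pvMarkersR : List (Nat × List Char) :=
  [(0, "<<<VAR_START>>>".toList), (1, "<<<VAR_END>>>".toList),
   (2, ['*','*','*']), (3, ['*','*']), (4, ['*']), (5, ['_','_'])]

-- hand port of texte.find(m, pos), relative to the remaining text from pos:
-- first occurrence index of m, none where Python returns -1 (exact)
def pvFind (m s : List Char) : Option Nat :=
  match s with
  | [] => if m.isPrefixOf [] then some 0 else none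
  | c :: rest =>
    if m.isPrefixOf (c :: rest) then some 0 else (pvFind m rest).map (· + 1)

-- one step of B's best-candidate update: keep the smaller index, first rank on ties
def pvCombine (best : Option (Nat × Nat)) (j? : Option Nat) (rank : Nat) :
    Option (Nat × Nat) :=
  match j?, best with
  | none, b => b
  | some j, none => some (j, rank)
  | some j, some (j0, r0) => if j < j0 then some (j, rank) else some (j0, r0)

-- the for-loop over enumerate(_MARKERS) computing `best`
def pvBest (s : List Char) : Option (Nat × Nat) :=
  pvMarkersR.foldl (fun best p => pvCombine best (pvFind p.2 s) p.1) none

-- the rank-indexed if/elif chain updating the four flags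
def pvApply (rank : Nat) (b i u z : Bool) : Bool × Bool × Bool × Bool :=
  if rank = 0 then (b, i, u, true)
  else if rank = 1 then (b, i, u, false)
  else if rank = 2 then (!b, !i, u, z)
  else if rank = 3 then (!b, i, u, z)
  else if rank = 4 then (b, !i, u, z)
  else (b, i, !u, z)

-- len(_MARKERS[rank])
def pvMarkerLen (rank : Nat) : Nat := ((pvMarkersR.lookup rank).getD []).length

lemma pvBest_shape (s : List Char) (j r : Nat) :
    ∀ (l : List (Nat × List Char)) (best : Option (Nat × Nat)),
      l.foldl (fun best p => pvCombine best (pvFind p.2 s) p.1) best = some (j, r) →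
      (∃ m, (r, m) ∈ l ∧ pvFind m s = some j) ∨ best = some (j, r) := by
  intro l
  induction l with
  | nil => intro best h; exact Or.inr h
  | cons p l ih =>
    intro best h
    rcases ih _ h with ⟨m, hm, hf⟩ | hb
    · exact Or.inl ⟨m, List.mem_cons_of_mem _ hm, hf⟩
    · replace hb : pvCombine best (pvFind p.2 s) p.1 = some (j, r) := hb
      rcases hfp : pvFind p.2 s with _ | j'
      · rw [hfp] at hb; exact Or.inr hb
      · rw [hfp] at hb
        unfold pvCombine at hb
        rcases best with _ | ⟨j0, r0⟩
        · simp at hb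
          exact Or.inl ⟨p.2, by simp [← hb.2], by rw [hfp, hb.1]⟩
        · by_cases hlt : j' < j0
          · simp [hlt] at hb
            exact Or.inl ⟨p.2, by simp [← hb.2], by rw [hfp, hb.1]⟩
          · simp [hlt] at hb; exact Or.inr (by rw [hb.1, hb.2])

-- facts needed for pvBLoop's termination, read off pvBest's result
lemma pvBest_some (s : List Char) (j r : Nat) (h : pvBest s = some (j, r)) :
    s ≠ [] ∧ 1 ≤ pvMarkerLen r := by
  rcases pvBest_shape s j r pvMarkersR none h with ⟨m, hm, hf⟩ | hb
  · have hmcase : (r = 0 ∧ m = "<<<VAR_START>>>".toList) ∨ (r = 1 ∧ m = "<<<VAR_END>>>".toList) ∨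
      (r = 2 ∧ m = ['*','*','*']) ∨ (r = 3 ∧ m = ['*','*']) ∨ (r = 4 ∧ m = ['*']) ∨
      (r = 5 ∧ m = ['_','_']) := by
      simpa [pvMarkersR, Prod.ext_iff] using hm
    have hmne : m ≠ [] := by
      rcases hmcase with ⟨_, h⟩ | ⟨_, h⟩ | ⟨_, h⟩ | ⟨_, h⟩ | ⟨_, h⟩ | ⟨_, h⟩ <;> simp [h]
    constructor
    · intro hs
      rw [hs] at hf
      simp only [pvFind] at hf
      rw [if_neg (by simpa [List.isPrefixOf] using hmne)] at hf
      simp at hf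
    · rcases hmcase with ⟨h1, _⟩ | ⟨h1, _⟩ | ⟨h1, _⟩ | ⟨h1, _⟩ | ⟨h1, _⟩ | ⟨h1, _⟩ <;>
        simp [h1, pvMarkerLen, pvMarkersR, List.lookup]
  · simp at hb

-- Literal port of B's while-loop, relative to the remaining text (pos ↦ 0):
-- emit the run before the best marker, apply its effect, jump past it.
def pvBLoop (s : List Char) (b i u z : Bool) :
    List (String × List (String × Bool)) :=
  match h : pvBest s with
  | none => if s ≠ [] then [(String.ofList s, pvFlags b i u z)] else []
  | some (j, rank) =>
    (if s.take j ≠ [] then [(String.ofList (s.take j), pvFlags b i u z)] else []) ++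
      (match pvApply rank b i u z with
       | (b', i', u', z') => pvBLoop (s.drop (j + pvMarkerLen rank)) b' i' u' z')
  termination_by s.length
  decreasing_by
    have := pvBest_some s j rank h
    have hs : 1 ≤ s.length := by
      cases s with
      | nil => exact absurd rfl this.1
      | cons _ _ => simp
    simp only [List.length_drop]
    omega

def traiter_formatage_markdown_alt (texte : String) : List (String × (List (String × Bool))) :=
  pvBLoop texte.toList false false false false

-- ===== PRECONDITION & SPEC =====
def Spec_traiter_formatage_markdown (texte : String) (out : List (String × (List (String × Bool)))) : Prop := out = traiter_formatage_markdown_alt texte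
instance (texte : String) (out : List (String × (List (String × Bool)))) : Decidable (Spec_traiter_formatage_markdown texte out) := by unfold Spec_traiter_formatage_markdown; infer_instance

-- ===== CLAIM (what is proved, stated in full; the proofs are below) =====
def Claim_equal_traiter_formatage_markdown : Prop := ∀ (texte : String), Dom_traiter_formatage_markdown texte → Spec_traiter_formatage_markdown texte (traiter_formatage_markdown texte)

-- ===== LEMMAS AND PROOFS =====

-- proof-side: the first marker (in priority order) that matches at position 0
def pvFirst (s : List Char) : Option Nat :=
  if pvVS.isPrefixOf s then some 0
  else if pvVE.isPrefixOf s then some 1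
  else if ['*','*','*'].isPrefixOf s then some 2
  else if ['*','*'].isPrefixOf s then some 3
  else if ['*'].isPrefixOf s then some 4
  else if ['_','_'].isPrefixOf s then some 5
  else none

def pvBmap (o : Option (Nat × Nat)) : Option (Nat × Nat) :=
  o.map (fun p => (p.1 + 1, p.2))

def pvFoldB (l : List (Nat × List Char)) (s : List Char) (best : Option (Nat × Nat)) :
    Option (Nat × Nat) :=
  l.foldl (fun best p => pvCombine best (pvFind p.2 s) p.1) best

lemma pvFoldB_zero (l : List (Nat × List Char)) (s : List Char) (r : Nat) :
    pvFoldB l s (some (0, r)) = some (0, r) := by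
  induction l with
  | nil => rfl
  | cons p l ih =>
    unfold pvFoldB at *
    simp only [List.foldl_cons]
    have hstep : pvCombine (some (0, r)) (pvFind p.2 s) p.1 = some (0, r) := by
      rcases pvFind p.2 s with _ | j <;> simp [pvCombine]
    show List.foldl _ (pvCombine (some (0, r)) (pvFind p.2 s) p.1) l = some (0, r)
    rw [hstep]
    exact ih

lemma pvFoldB_cons (l : List (Nat × List Char)) (c : Char) (t : List Char)
    (h : ∀ p ∈ l, (p.2).isPrefixOf (c :: t) = false) (best : Option (Nat × Nat)) :
    pvFoldB l (c :: t) (pvBmap best) = pvBmap (pvFoldB l t best) := by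
  induction l generalizing best with
  | nil => rfl
  | cons p l ih =>
    unfold pvFoldB
    simp only [List.foldl_cons]
    have hp : (p.2).isPrefixOf (c :: t) = false := h p (List.mem_cons_self ..)
    have hstep : pvCombine (pvBmap best) (pvFind p.2 (c :: t)) p.1 =
        pvBmap (pvCombine best (pvFind p.2 t) p.1) := by
      have : pvFind p.2 (c :: t) = (pvFind p.2 t).map (· + 1) := by
        simp [pvFind, hp]
      rw [this]
      rcases hf : pvFind p.2 t with _ | j
      · simp [pvCombine]
      · rcases best with _ | ⟨j0, r0⟩
        · simp [pvCombine, pvBmap]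
        · by_cases hlt : j < j0 <;>
            simp [pvCombine, pvBmap, hlt]
    rw [hstep]
    exact ih (fun q hq => h q (List.mem_cons_of_mem _ hq)) _

lemma pvBest_at_zero (c : Char) (t : List Char) (l1 l2 : List (Nat × List Char))
    (r0 : Nat) (m0 : List Char)
    (hsplit : pvMarkersR = l1 ++ (r0, m0) :: l2)
    (h1 : ∀ p ∈ l1, (p.2).isPrefixOf (c :: t) = false)
    (h0 : m0.isPrefixOf (c :: t) = true) :
    pvBest (c :: t) = some (0, r0) := by
  have hb : pvBest (c :: t) = pvFoldB l2 (c :: t)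
      (pvCombine (pvFoldB l1 (c :: t) none) (pvFind m0 (c :: t)) r0) := by
    simp [pvBest, hsplit, pvFoldB, List.foldl_append]
  have hf0 : pvFind m0 (c :: t) = some 0 := by simp [pvFind, h0]
  have hl1 : pvFoldB l1 (c :: t) none = pvBmap (pvFoldB l1 t none) := by
    have := pvFoldB_cons l1 c t h1 none
    simpa [pvBmap] using this
  rw [hb, hf0, hl1]
  have habs : pvCombine (pvBmap (pvFoldB l1 t none)) (some 0) r0 = some (0, r0) := by
    rcases pvFoldB l1 t none with _ | ⟨j0, rr⟩ <;> simp [pvBmap, pvCombine]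
  rw [habs, pvFoldB_zero]

-- the single characterization pvBest = "first match at 0, else shift pvBest of the tail"
lemma pvNP {m s : List Char} (h : ¬ m.isPrefixOf s = true) : m.isPrefixOf s = false :=
  Bool.eq_false_iff.mpr h

lemma pvBest_cons (c : Char) (t : List Char) :
    pvBest (c :: t) =
      match pvFirst (c :: t) with
      | some r => some (0, r)
      | none => pvBmap (pvBest t) := by
  by_cases h0 : pvVS.isPrefixOf (c :: t)
  · rw [show pvFirst (c :: t) = some 0 by simp [pvFirst, h0]]
    exact pvBest_at_zero c t []
      [(1, pvVE), (2, ['*','*','*']), (3, ['*','*']), (4, ['*']), (5, ['_','_'])]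
      0 pvVS (by simp [pvMarkersR, pvVS, pvVE]) (by intro p hp; cases hp) h0
  by_cases h1 : pvVE.isPrefixOf (c :: t)
  · rw [show pvFirst (c :: t) = some 1 by simp [pvFirst, h0, h1]]
    refine pvBest_at_zero c t [(0, pvVS)]
      [(2, ['*','*','*']), (3, ['*','*']), (4, ['*']), (5, ['_','_'])]
      1 pvVE (by simp [pvMarkersR, pvVS, pvVE]) ?_ h1
    intro p hp
    simp only [List.mem_cons, List.not_mem_nil, or_false] at hp
    subst hp
    exact pvNP h0
  by_cases h2 : List.isPrefixOf ['*','*','*'] (c :: t)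
  · rw [show pvFirst (c :: t) = some 2 by simp [pvFirst, h0, h1, h2]]
    refine pvBest_at_zero c t [(0, pvVS), (1, pvVE)]
      [(3, ['*','*']), (4, ['*']), (5, ['_','_'])]
      2 ['*','*','*'] (by simp [pvMarkersR, pvVS, pvVE]) ?_ h2
    intro p hp
    simp only [List.mem_cons, List.not_mem_nil, or_false] at hp
    rcases hp with rfl | rfl
    · exact pvNP h0
    · exact pvNP h1
  by_cases h3 : List.isPrefixOf ['*','*'] (c :: t)
  · rw [show pvFirst (c :: t) = some 3 by simp [pvFirst, h0, h1, h2, h3]]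
    refine pvBest_at_zero c t [(0, pvVS), (1, pvVE), (2, ['*','*','*'])]
      [(4, ['*']), (5, ['_','_'])]
      3 ['*','*'] (by simp [pvMarkersR, pvVS, pvVE]) ?_ h3
    intro p hp
    simp only [List.mem_cons, List.not_mem_nil, or_false] at hp
    rcases hp with rfl | rfl | rfl
    · exact pvNP h0
    · exact pvNP h1
    · exact pvNP h2
  by_cases h4 : List.isPrefixOf ['*'] (c :: t)
  · rw [show pvFirst (c :: t) = some 4 by simp [pvFirst, h0, h1, h2, h3, h4]]
    refine pvBest_at_zero c t
      [(0, pvVS), (1, pvVE), (2, ['*','*','*']), (3, ['*','*'])]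
      [(5, ['_','_'])]
      4 ['*'] (by simp [pvMarkersR, pvVS, pvVE]) ?_ h4
    intro p hp
    simp only [List.mem_cons, List.not_mem_nil, or_false] at hp
    rcases hp with rfl | rfl | rfl | rfl
    · exact pvNP h0
    · exact pvNP h1
    · exact pvNP h2
    · exact pvNP h3
  by_cases h5 : List.isPrefixOf ['_','_'] (c :: t)
  · rw [show pvFirst (c :: t) = some 5 by simp [pvFirst, h0, h1, h2, h3, h4, h5]]
    refine pvBest_at_zero c t
      [(0, pvVS), (1, pvVE), (2, ['*','*','*']), (3, ['*','*']), (4, ['*'])]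
      []
      5 ['_','_'] (by simp [pvMarkersR, pvVS, pvVE]) ?_ h5
    intro p hp
    simp only [List.mem_cons, List.not_mem_nil, or_false] at hp
    rcases hp with rfl | rfl | rfl | rfl | rfl
    · exact pvNP h0
    · exact pvNP h1
    · exact pvNP h2
    · exact pvNP h3
    · exact pvNP h4
  · rw [show pvFirst (c :: t) = none by simp [pvFirst, h0, h1, h2, h3, h4, h5]]
    have hall : ∀ p ∈ pvMarkersR, (p.2).isPrefixOf (c :: t) = false := by
      intro p hp
      simp only [pvMarkersR, List.mem_cons, List.not_mem_nil, or_false] at hp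
      rcases hp with rfl | rfl | rfl | rfl | rfl | rfl
      · exact pvNP h0
      · exact pvNP h1
      · exact pvNP h2
      · exact pvNP h3
      · exact pvNP h4
      · exact pvNP h5
    have := pvFoldB_cons pvMarkersR c t hall none
    simpa [pvBest, pvFoldB, pvBmap] using this

-- B's loop body with a pending prefix `cur` in front of the emitted run
def pvPreB (s cur : List Char) (b i u z : Bool) :
    List (String × List (String × Bool)) :=
  match pvBest s with
  | none => if (cur ++ s) ≠ [] then [(String.ofList (cur ++ s), pvFlags b i u z)] else []
  | some (j, r) =>
    (if (cur ++ s.take j) ≠ [] then [(String.ofList (cur ++ s.take j), pvFlags b i u z)] else []) ++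
      (match pvApply r b i u z with
       | (b', i', u', z') => pvBLoop (s.drop (j + pvMarkerLen r)) b' i' u' z')

lemma pvBLoop_eq_preB (s : List Char) (b i u z : Bool) :
    pvBLoop s b i u z = pvPreB s [] b i u z := by
  rw [pvBLoop, pvPreB]
  rcases h : pvBest s with _ | ⟨j, r⟩ <;> simp

lemma pvBest_nil : pvBest [] = none := by decide

lemma pvMain : ∀ (n : Nat) (s cur : List Char) (b i u z : Bool), s.length ≤ n →
    pvALoop s cur b i u z = pvPreB s cur b i u z := by
  intro n
  induction n with
  | zero =>
    intro s cur b i u z hlen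
    have hs : s = [] := by cases s <;> simp_all
    subst hs
    simp [pvALoop, pvPreB, pvBest_nil]
  | succ n ih =>
    intro s cur b i u z hlen
    cases s with
    | nil => simp [pvALoop, pvPreB, pvBest_nil]
    | cons c t =>
      have hlt : t.length ≤ n := by simpa using hlen
      by_cases h0 : pvVS.isPrefixOf (c :: t)
      · have hbest : pvBest (c :: t) = some (0, 0) := by
          rw [pvBest_cons]; simp [pvFirst, h0]
        have hL : pvMarkerLen 0 = pvVS.length := by decide
        rw [pvALoop, pvPreB, hbest]
        simp only [if_pos h0, List.take_zero, List.append_nil]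
        rw [ih _ [] _ _ _ _ (by simp [pvVS]; omega), pvBLoop_eq_preB]
        simp [pvApply, hL]
      · by_cases h1 : pvVE.isPrefixOf (c :: t)
        · have hbest : pvBest (c :: t) = some (0, 1) := by
            rw [pvBest_cons]; simp [pvFirst, h0, h1]
          have hL : pvMarkerLen 1 = pvVE.length := by decide
          rw [pvALoop, pvPreB, hbest]
          simp only [if_neg h0, if_pos h1, List.take_zero, List.append_nil]
          rw [ih _ [] _ _ _ _ (by simp [pvVE]; omega), pvBLoop_eq_preB]
          simp [pvApply, hL]
        · by_cases h2 : List.isPrefixOf ['*','*','*'] (c :: t)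
          · have hbest : pvBest (c :: t) = some (0, 2) := by
              rw [pvBest_cons]; simp [pvFirst, h0, h1, h2]
            have hL : pvMarkerLen 2 = 3 := by decide
            rw [pvALoop, pvPreB, hbest]
            simp only [if_neg h0, if_neg h1, if_pos h2, List.take_zero, List.append_nil]
            rw [ih _ [] _ _ _ _ (by simp; omega), pvBLoop_eq_preB]
            simp [pvApply, hL]
          · by_cases h3 : List.isPrefixOf ['*','*'] (c :: t)
            · have hbest : pvBest (c :: t) = some (0, 3) := by
                rw [pvBest_cons]; simp [pvFirst, h0, h1, h2, h3]
              have hL : pvMarkerLen 3 = 2 := by decide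
              rw [pvALoop, pvPreB, hbest]
              simp only [if_neg h0, if_neg h1, if_neg h2, if_pos h3, List.take_zero,
                List.append_nil]
              rw [ih _ [] _ _ _ _ (by simp; omega), pvBLoop_eq_preB]
              simp [pvApply, hL]
            · by_cases h4 : List.isPrefixOf ['*'] (c :: t)
              · -- star: A's guard (next char ≠ '*') follows from ¬'**'-prefix
                have hc : c = '*' := by
                  have h := h4
                  simp [List.isPrefixOf] at h
                  exact h.symm
                have hguard : c = '*' ∧ t.head? ≠ some '*' := by
                  refine ⟨hc, ?_⟩
                  cases t with
                  | nil => simp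
                  | cons d t' =>
                    simp only [List.head?_cons, ne_eq, Option.some.injEq]
                    intro hd
                    exact h3 (by simp [List.isPrefixOf, hc, hd])
                have hbest : pvBest (c :: t) = some (0, 4) := by
                  rw [pvBest_cons]; simp [pvFirst, h0, h1, h2, h3, h4]
                have hL : pvMarkerLen 4 = 1 := by decide
                rw [pvALoop, pvPreB, hbest]
                simp only [if_neg h0, if_neg h1, if_neg h2, if_neg h3, if_pos hguard,
                  List.take_zero, List.append_nil]
                rw [ih _ [] _ _ _ _ (by simpa using hlt), pvBLoop_eq_preB]
                simp [pvApply, hL]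
              · by_cases h5 : List.isPrefixOf ['_','_'] (c :: t)
                · have hguard : ¬(c = '*' ∧ t.head? ≠ some '*') := by
                    intro hg
                    exact h4 (by simp [List.isPrefixOf, hg.1])
                  have hbest : pvBest (c :: t) = some (0, 5) := by
                    rw [pvBest_cons]; simp [pvFirst, h0, h1, h2, h3, h4, h5]
                  have hL : pvMarkerLen 5 = 2 := by decide
                  rw [pvALoop, pvPreB, hbest]
                  simp only [if_neg h0, if_neg h1, if_neg h2, if_neg h3, if_neg hguard,
                    if_pos h5, List.take_zero, List.append_nil]
                  rw [ih _ [] _ _ _ _ (by simp; omega), pvBLoop_eq_preB]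
                  simp [pvApply, hL]
                · -- no marker at this position: A buffers c; pvBest shifts by one
                  have hguard : ¬(c = '*' ∧ t.head? ≠ some '*') := by
                    intro hg
                    exact h4 (by simp [List.isPrefixOf, hg.1])
                  have hbest : pvBest (c :: t) = pvBmap (pvBest t) := by
                    rw [pvBest_cons]; simp [pvFirst, h0, h1, h2, h3, h4, h5]
                  rw [pvALoop]
                  simp only [if_neg h0, if_neg h1, if_neg h2, if_neg h3, if_neg hguard,
                    if_neg h5]
                  rw [ih _ _ _ _ _ _ hlt]
                  rw [pvPreB, pvPreB, hbest]
                  rcases hb : pvBest t with _ | ⟨j, r⟩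
                  · simp [pvBmap]
                  · simp only [pvBmap, Option.map_some]
                    have htake : (c :: t).take (j + 1) = c :: t.take j := by simp
                    have hdrop : (c :: t).drop (j + 1 + pvMarkerLen r) =
                        t.drop (j + pvMarkerLen r) := by
                      have : j + 1 + pvMarkerLen r = (j + pvMarkerLen r) + 1 := by omega
                      rw [this, List.drop_succ_cons]
                    simp [htake, hdrop]

-- ===== VERDICT (by name: the statement is the Claim_ definition above) =====
theorem traiter_formatage_markdown_spec : Claim_equal_traiter_formatage_markdown := by
  intro texte _
  unfold Spec_traiter_formatage_markdown traiter_formatage_markdown traiter_formatage_markdown_alt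
  rw [pvMain texte.toList.length _ _ _ _ _ _ le_rfl, pvBLoop_eq_preB]
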